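-- pv_equiv track=rewrite | github.com/yhsung/Solar-Flare | src/solar_flare/agents/embedded_designer.py | _build_default_requirements
-- ===== SOURCE A (Python) =====
-- from typing import List, Dict, Any
--
-- def _build_default_requirements(components: List[str]) -> str:
--     """Build default requirements based on components."""
--     reqs = []
--
--     if "ring_buffer" in components:
--         reqs.extend(
--             [
--                 "Lock-free ring buffer with atomic operations",
--                 "Support for OVERWRITE and STOP overflow policies",
--                 "Cache-line aligned entries for performance",
--             ]
--         )
--
--     if "dma" in components or "dma_controller" in components:
--         reqs.extend(
--             [
--                 "Descriptor chain-based DMA transfers",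
--                 "64KB burst transfers",
--                 "Error handling for transfer failures",
--             ]
--         )
--
--     if "isr" in components or "interrupt" in components:
--         reqs.extend(
--             [
--                 "Minimal ISR execution time",
--                 "Deferred processing for non-critical work",
--                 "Priority configuration guidance",
--             ]
--         )
--
--     return "\n".join(f"- {req}" for req in reqs)
-- ===== SOURCE B (Python) =====
-- from typing import List
--
-- # Inverted index: each known keyword maps to its requirement-group id.
-- _GROUP_OF = {
--     "ring_buffer": 0,
--     "dma": 1,
--     "dma_controller": 1,
--     "isr": 2,
--     "interrupt": 2,
-- }
--
-- _GROUP_REQS = [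
--     [
--         "Lock-free ring buffer with atomic operations",
--         "Support for OVERWRITE and STOP overflow policies",
--         "Cache-line aligned entries for performance",
--     ],
--     [
--         "Descriptor chain-based DMA transfers",
--         "64KB burst transfers",
--         "Error handling for transfer failures",
--     ],
--     [
--         "Minimal ISR execution time",
--         "Deferred processing for non-critical work",
--         "Priority configuration guidance",
--     ],
-- ]
--
-- def _build_default_requirements(components: List[str]) -> str:
--     # One pass over components through the inverted index, collecting fired groups.
--     fired = set()
--     for c in components:
--         g = _GROUP_OF.get(c)
--         if g is not None:
--             fired.add(g)
--     out = []
--     for i, reqs in enumerate(_GROUP_REQS):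
--         if i in fired:
--             for r in reqs:
--                 out.append("- " + r)
--     return "\n".join(out)
-- ===== Notes on version B (the rewrite author's own statement) =====
-- stated objective: alternative
-- what changed: Inverted the traversal: instead of testing each trigger keyword for membership in components (repeated scans of the input), B makes one pass over the components themselves through an inverted keyword-to-group index, accumulating the set of fired group ids, then emits the groups' requirement lines in fixed order.
import Mathlib
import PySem

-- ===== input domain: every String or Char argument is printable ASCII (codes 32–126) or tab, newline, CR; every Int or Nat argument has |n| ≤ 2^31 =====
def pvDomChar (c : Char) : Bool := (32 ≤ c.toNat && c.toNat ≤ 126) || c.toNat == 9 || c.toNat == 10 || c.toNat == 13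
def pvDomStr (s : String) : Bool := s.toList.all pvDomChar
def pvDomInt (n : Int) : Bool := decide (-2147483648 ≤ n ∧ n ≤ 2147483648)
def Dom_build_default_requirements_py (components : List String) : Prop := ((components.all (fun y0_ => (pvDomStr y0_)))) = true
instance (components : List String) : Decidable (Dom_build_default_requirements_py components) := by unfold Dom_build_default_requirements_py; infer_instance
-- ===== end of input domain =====

-- ===== PORT A =====
-- A: three if/extend branches over trigger keywords, then a "- "-prefixed join.
-- B inverts the traversal: one pass over components via a keyword→group index into a set of fired groups (alternative decomposition).
def build_default_requirements_py (components : List String) : String :=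
  let reqs : List String := []
  let reqs := if components.contains "ring_buffer" then
      reqs ++ ["Lock-free ring buffer with atomic operations",
               "Support for OVERWRITE and STOP overflow policies",
               "Cache-line aligned entries for performance"]
    else reqs
  let reqs := if components.contains "dma" || components.contains "dma_controller" then
      reqs ++ ["Descriptor chain-based DMA transfers",
               "64KB burst transfers",
               "Error handling for transfer failures"]
    else reqs
  let reqs := if components.contains "isr" || components.contains "interrupt" then
      reqs ++ ["Minimal ISR execution time",
               "Deferred processing for non-critical work",
               "Priority configuration guidance"]
    else reqs
  String.intercalate "\n" (reqs.map (fun req => "- " ++ req))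

-- ===== PORT B =====
def groupOf : PySem.Dict String Int :=
  PySem.Dict.ofList
    [("ring_buffer", 0), ("dma", 1), ("dma_controller", 1), ("isr", 2), ("interrupt", 2)]

def groupReqs : List (List String) :=
  [["Lock-free ring buffer with atomic operations",
    "Support for OVERWRITE and STOP overflow policies",
    "Cache-line aligned entries for performance"],
   ["Descriptor chain-based DMA transfers",
    "64KB burst transfers",
    "Error handling for transfer failures"],
   ["Minimal ISR execution time",
    "Deferred processing for non-critical work",
    "Priority configuration guidance"]]

def firedSet (components : List String) : PySem.Set Int :=
  components.foldl (fun s c =>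
    match PySem.Dict.get? groupOf c with
    | some g => PySem.Set.add s g
    | none => s) PySem.Set.empty

def build_default_requirements_py_alt (components : List String) : String :=
  let fired := firedSet components
  let out := (PySem.List.enumerate groupReqs).foldl (fun acc p =>
      if PySem.Set.contains fired p.1 then
        p.2.foldl (fun acc r => acc ++ ["- " ++ r]) acc
      else acc) ([] : List String)
  String.intercalate "\n" out

-- ===== PRECONDITION & SPEC =====
def Spec_build_default_requirements_py (components : List String) (out : String) : Prop := out = build_default_requirements_py_alt components
instance (components : List String) (out : String) : Decidable (Spec_build_default_requirements_py components out) := by unfold Spec_build_default_requirements_py; infer_instance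

-- ===== CLAIM (what is proved, stated in full; the proofs are below) =====
def Claim_equal_build_default_requirements_py : Prop := ∀ (components : List String), Dom_build_default_requirements_py components → Spec_build_default_requirements_py components (build_default_requirements_py components)

-- ===== LEMMAS AND PROOFS =====

theorem fired_contains (g : Int) : ∀ (components : List String) (s : PySem.Set Int),
    PySem.Set.contains
      (components.foldl (fun s c =>
        match PySem.Dict.get? groupOf c with
        | some h => PySem.Set.add s h
        | none => s) s) g
    = (PySem.Set.contains s g ||
       components.any (fun c => (PySem.Dict.get? groupOf c).any (fun h => h == g))) := by
  intro components
  induction components with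
  | nil => intro s; simp
  | cons c cs ih =>
    intro s
    simp only [List.foldl_cons, List.any_cons, ih]
    cases hc : PySem.Dict.get? groupOf c with
    | none => simp
    | some h =>
      simp only [Option.any_some, PySem.Set.contains, List.contains_eq_mem,
        PySem.Set.mem_add]
      by_cases hg : h = g
      · simp [hg]
      · have hb : (h == g) = false := by simpa using hg
        simp [hb, Ne.symm hg]

theorem groupOf_mk : groupOf = PySem.Dict.mk
    [("ring_buffer", 0), ("dma", 1), ("dma_controller", 1), ("isr", 2), ("interrupt", 2)] := by
  decide

theorem get?_group0 (c : String) :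
    ((PySem.Dict.get? groupOf c).any (fun h => h == (0 : Int))) = (c == "ring_buffer") := by
  simp only [groupOf_mk, PySem.Dict.get?_mk_cons]
  cases hb1 : ("ring_buffer" == c) <;>
  cases hb2 : ("dma" == c) <;>
  cases hb3 : ("dma_controller" == c) <;>
  cases hb4 : ("isr" == c) <;>
  cases hb5 : ("interrupt" == c) <;>
  simp_all [PySem.Dict.get?, ne_comm]

theorem get?_group1 (c : String) :
    ((PySem.Dict.get? groupOf c).any (fun h => h == (1 : Int)))
      = (c == "dma" || c == "dma_controller") := by
  simp only [groupOf_mk, PySem.Dict.get?_mk_cons]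
  cases hb1 : ("ring_buffer" == c) <;>
  cases hb2 : ("dma" == c) <;>
  cases hb3 : ("dma_controller" == c) <;>
  cases hb4 : ("isr" == c) <;>
  cases hb5 : ("interrupt" == c) <;>
  simp_all [PySem.Dict.get?, ne_comm] <;> (subst c; simp_all)

theorem get?_group2 (c : String) :
    ((PySem.Dict.get? groupOf c).any (fun h => h == (2 : Int)))
      = (c == "isr" || c == "interrupt") := by
  simp only [groupOf_mk, PySem.Dict.get?_mk_cons]
  cases hb1 : ("ring_buffer" == c) <;>
  cases hb2 : ("dma" == c) <;>
  cases hb3 : ("dma_controller" == c) <;>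
  cases hb4 : ("isr" == c) <;>
  cases hb5 : ("interrupt" == c) <;>
  simp_all [PySem.Dict.get?, ne_comm] <;> (subst c; simp_all)

theorem any_or_eq (l : List String) (a b : String) :
    (l.any fun x => x == a || x == b) = (l.contains a || l.contains b) := by
  have hx : ∀ u v : String, (u == v) = decide (v = u) := by
    intro u v
    by_cases h : u = v
    · simp [h]
    · simp [h, Ne.symm h]
  induction l with
  | nil => rfl
  | cons x xs ih =>
    simp only [List.any_cons, hx, List.contains_eq_mem] at ih ⊢
    simp [ih, Bool.or_assoc, Bool.or_left_comm]

theorem fired0 (cs : List String) :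
    PySem.Set.contains (firedSet cs) 0 = cs.contains "ring_buffer" := by
  unfold firedSet
  rw [fired_contains, funext get?_group0]
  simp [PySem.Set.empty, PySem.Set.contains, List.any_beq']

theorem fired1 (cs : List String) :
    PySem.Set.contains (firedSet cs) 1
      = (cs.contains "dma" || cs.contains "dma_controller") := by
  unfold firedSet
  rw [fired_contains, funext get?_group1]
  simp [PySem.Set.empty, PySem.Set.contains, any_or_eq]

theorem fired2 (cs : List String) :
    PySem.Set.contains (firedSet cs) 2
      = (cs.contains "isr" || cs.contains "interrupt") := by
  unfold firedSet
  rw [fired_contains, funext get?_group2]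
  simp [PySem.Set.empty, PySem.Set.contains, any_or_eq]

theorem fired1_mem (cs : List String) :
    (1 : Int) ∈ firedSet cs ↔ ("dma" ∈ cs ∨ "dma_controller" ∈ cs) := by
  have h := fired1 cs
  simp only [PySem.Set.contains, List.contains_eq_mem, ← Bool.decide_or, decide_eq_decide] at h
  exact h

theorem fired2_mem (cs : List String) :
    (2 : Int) ∈ firedSet cs ↔ ("isr" ∈ cs ∨ "interrupt" ∈ cs) := by
  have h := fired2 cs
  simp only [PySem.Set.contains, List.contains_eq_mem, ← Bool.decide_or, decide_eq_decide] at h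
  exact h

-- ===== VERDICT (by name: the statement is the Claim_ definition above) =====
theorem build_default_requirements_py_spec : Claim_equal_build_default_requirements_py := by
  intro components _
  unfold Spec_build_default_requirements_py build_default_requirements_py build_default_requirements_py_alt
  simp only [groupReqs, PySem.List.enumerate_cons, PySem.List.enumerate_nil,
    List.foldl_cons, List.foldl_nil, fired0]
  by_cases h1 : "ring_buffer" ∈ components <;>
  by_cases h2 : "dma" ∈ components <;>
  by_cases h3 : "dma_controller" ∈ components <;>
  by_cases h4 : "isr" ∈ components <;>
  by_cases h5 : "interrupt" ∈ components <;>
  simp [List.contains_eq_mem, fired1_mem, fired2_mem, h1, h2, h3, h4, h5]
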